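-- pv_equiv track=rewrite | github.com/zyboyoung/ExerciseGit | Shuati/greedy/Fence Repair.py | fence_split
-- ===== SOURCE A (Python) =====
-- def fence_split(ln: list) -> int:
-- 	n = sum(ln)
-- 	ln.sort(reverse=True)
-- 	res = 0
-- 	for i in range(len(ln) - 1):
-- 		res += n
-- 		n -= ln[i]
-- 	return res
-- ===== SOURCE B (Python) =====
-- def fence_split(ln: list) -> int:
--     ln.sort(reverse=True)
--     m = len(ln) - 1
--     return sum(x * min(i + 1, m) for i, x in enumerate(ln))
-- ===== Notes on version B (the rewrite author's own statement) =====
-- stated objective: simpler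
-- what changed: Replaces the decrementing running-total accumulator loop over sum(ln) by a direct weighted sum: after the same descending in-place sort, each element at index i contributes ln[i]*min(i+1, len-1).
import Mathlib
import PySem

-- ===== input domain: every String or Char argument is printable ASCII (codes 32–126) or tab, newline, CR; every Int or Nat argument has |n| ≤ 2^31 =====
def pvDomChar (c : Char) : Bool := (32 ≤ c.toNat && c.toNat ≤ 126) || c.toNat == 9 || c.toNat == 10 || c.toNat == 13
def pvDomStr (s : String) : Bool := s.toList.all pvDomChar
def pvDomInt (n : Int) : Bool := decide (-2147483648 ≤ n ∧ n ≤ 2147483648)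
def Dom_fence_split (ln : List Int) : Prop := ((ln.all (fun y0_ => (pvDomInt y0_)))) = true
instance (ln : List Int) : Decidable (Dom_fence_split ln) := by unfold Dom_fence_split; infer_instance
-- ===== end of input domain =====

-- B replaces A's decrementing running-total loop by a direct weighted sum x*min(i+1, len-1)
-- over the same descending sort (objective: simpler). Both A and B sort ln in place in Python;
-- the equivalence proved here is about the return value.

-- ===== PORT A =====
def fence_split (ln : List Int) : Int :=
  let n : Int := ln.sum
  let s := PySem.List.sorted ln (fun x => x) true
  let st := (PySem.List.pyRange 0 ((s.length : Int) - 1) 1).foldl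
      (fun (p : Int × Int) i => (p.1 - PySem.List.pyGetD s i 0, p.2 + p.1)) (n, 0)
  st.2

-- ===== PORT B =====
def fence_split_alt (ln : List Int) : Int :=
  let s := PySem.List.sorted ln (fun x => x) true
  let m : Int := (s.length : Int) - 1
  (PySem.List.enumerate s 0).foldl (fun acc (p : Int × Int) => acc + p.2 * min (p.1 + 1) m) 0

-- ===== PRECONDITION & SPEC =====
def Spec_fence_split (ln : List Int) (out : Int) : Prop := out = fence_split_alt ln
instance (ln : List Int) (out : Int) : Decidable (Spec_fence_split ln out) := by unfold Spec_fence_split; infer_instance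

-- ===== CLAIM (what is proved, stated in full; the proofs are below) =====
def Claim_equal_fence_split : Prop := ∀ (ln : List Int), Dom_fence_split ln → Spec_fence_split ln (fence_split ln)

-- ===== LEMMAS AND PROOFS =====

-- A's loop as structural recursion on the (len-1)-prefix of the sorted list
def pvFloop : List Int → Int → Int → Int
  | [], _, res => res
  | x :: t, n, res => pvFloop t (n - x) (res + n)

theorem pvFloop_acc (t : List Int) (n r : Int) : pvFloop t n r = r + pvFloop t n 0 := by
  induction t generalizing n r with
  | nil => simp [pvFloop]
  | cons x t ih => rw [pvFloop, pvFloop, ih (n - x) (r + n), ih (n - x) (0 + n)]; ring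

theorem pvFloop_foldl (t : List Int) (n r : Int) :
    (t.foldl (fun (p : Int × Int) x => (p.1 - x, p.2 + p.1)) (n, r)).2 = pvFloop t n r := by
  induction t generalizing n r with
  | nil => rfl
  | cons x t ih => simpa [List.foldl, pvFloop] using ih (n - x) (r + n)

-- B's comprehension sum, with explicit start index
def pvGsum (m : Int) : List Int → Int → Int
  | [], _ => 0
  | x :: xs, i => x * min (i + 1) m + pvGsum m xs (i + 1)

theorem pvGsum_foldl (m : Int) (s : List Int) (k acc : Int) :
    (PySem.List.enumerate s k).foldl (fun acc (p : Int × Int) => acc + p.2 * min (p.1 + 1) m) acc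
      = acc + pvGsum m s k := by
  induction s generalizing k acc with
  | nil => simp [PySem.List.enumerate_nil, pvGsum]
  | cons x xs ih =>
      rw [PySem.List.enumerate_cons, List.foldl, ih (k + 1) (acc + x * min (k + 1) m), pvGsum]
      ring

theorem pvGsum_shift (m : Int) (s : List Int) (k : Int) :
    pvGsum m s (k + 1) = pvGsum (m - 1) s k + s.sum := by
  induction s generalizing k with
  | nil => simp [pvGsum]
  | cons x xs ih =>
      rw [pvGsum, pvGsum, ih (k + 1), List.sum_cons]
      have : min (k + 1 + 1) m = min (k + 1) (m - 1) + 1 := by omega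
      rw [this]; ring

theorem pv_main (s : List Int) :
    pvFloop s.dropLast s.sum 0 = pvGsum ((s.length : Int) - 1) s 0 := by
  induction s with
  | nil => simp [pvFloop, pvGsum]
  | cons x xs ih =>
      cases xs with
      | nil => simp [pvFloop, pvGsum]
      | cons y ys =>
          rw [List.dropLast_cons_of_ne_nil (by simp), List.sum_cons, pvFloop, pvFloop_acc, pvGsum]
          rw [show ((0 : Int) + 1) = (0 + 1 : Int) from rfl, pvGsum_shift]
          have hmin : min ((0 : Int) + 1) (((x :: y :: ys).length : Int) - 1) = 1 := by
            simp only [List.length_cons]; push_cast; omega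
          have hm : ((x :: y :: ys).length : Int) - 1 - 1 = ((y :: ys).length : Int) - 1 := by
            simp only [List.length_cons]; push_cast; omega
          rw [hmin, hm, show x + (y :: ys).sum - x = (y :: ys).sum from by ring, ih]
          ring

-- rewrite A's pyRange/pyGetD fold into the structural fold over s.dropLast
theorem pvA_fold (s : List Int) (n : Int) :
    ((PySem.List.pyRange 0 ((s.length : Int) - 1) 1).foldl
        (fun (p : Int × Int) i => (p.1 - PySem.List.pyGetD s i 0, p.2 + p.1)) (n, 0)).2
      = pvFloop s.dropLast n 0 := by
  rcases List.eq_nil_or_concat' s with rfl | ⟨t, x, rfl⟩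
  · simp [PySem.List.pyRange, pvFloop]
  · have hlen : ((t ++ [x]).length : Int) - 1 = ((t ++ [x]).dropLast.length : Int) := by
      simp
    rw [hlen]
    have hcongr :
        (PySem.List.pyRange 0 (((t ++ [x]).dropLast.length : Int)) 1).foldl
            (fun (p : Int × Int) i => (p.1 - PySem.List.pyGetD (t ++ [x]) i 0, p.2 + p.1)) (n, 0)
          = (PySem.List.pyRange 0 (((t ++ [x]).dropLast.length : Int)) 1).foldl
            (fun (p : Int × Int) i => (p.1 - PySem.List.pyGetD (t ++ [x]).dropLast i 0, p.2 + p.1)) (n, 0) := by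
      apply PySem.List.foldl_congr_mem
      intro acc i hi
      have h := PySem.List.mem_pyRange_one.1 hi
      have h0 : 0 ≤ i := h.1
      have h1 : i < ((t ++ [x]).dropLast.length : Int) := h.2
      have hget : PySem.List.pyGetD (t ++ [x]) i 0 = PySem.List.pyGetD (t ++ [x]).dropLast i 0 := by
        rw [PySem.List.pyGetD_eq_getElem _ _ h0 (by simp at h1 ⊢; omega),
            PySem.List.pyGetD_eq_getElem _ _ h0 (by simpa using h1)]
        have hit : i.toNat < t.length := by simp at h1; omega
        simp [hit]
      rw [hget]
    rw [hcongr, PySem.List.foldl_pyRange_zero_pyGetD' ((t ++ [x]).dropLast) 0 (fun (p : Int × Int) x => (p.1 - x, p.2 + p.1)) (n, 0), pvFloop_foldl]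

theorem fence_split_eq_alt (ln : List Int) : fence_split ln = fence_split_alt ln := by
  unfold fence_split fence_split_alt
  have hsum : (PySem.List.sorted ln (fun x => x) true).sum = ln.sum :=
    (PySem.List.sorted_perm ln (fun x => x) true).sum_eq
  rw [pvA_fold, pvGsum_foldl, ← hsum, pv_main]
  ring

-- ===== VERDICT (by name: the statement is the Claim_ definition above) =====
theorem fence_split_spec : Claim_equal_fence_split := by
  intro ln _
  exact fence_split_eq_alt ln
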